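-- pv_equiv track=rewrite | github.com/Kontari/MapGen | MakeMap.py | raise_shoreline
-- ===== SOURCE A (Python) =====
-- def raise_shoreline(grid, land=9, sea=1, sand=2, cutoff=1, rounds=1):
--     '''
--     Fill in ocean surrounded by land
--     '''
--     added_shoreline = False
--
--     for y in range(1, len(grid) - 1):
--         for x in range(1, len(grid[0]) - 1):
--
--             if grid[x][y] is land:
--
--                 neighbors = [grid[x-1][y-1], grid[x-1][y], grid[x-1][y+1],
--                              grid[x][y-1], grid[x][y+1], grid[x+1][y-1],
--                              grid[x+1][y], grid[x+1][y+1]]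
--
--                 if neighbors.count(sea) > cutoff:
--                     grid[x][y] = sand
--                     added_shoreline = True
--
--
--     if (rounds > 0) and (added_shoreline == True):
--         raise_shoreline(grid=grid, land=land, sea=sea, sand=sand,
--                       cutoff=cutoff, rounds=(rounds - 1))
--
--     return grid
-- ===== SOURCE B (Python) =====
-- OFF8 = [(-1, -1), (-1, 0), (-1, 1), (0, -1), (0, 1), (1, -1), (1, 0), (1, 1)]
--
--
-- def raise_shoreline(grid, land=9, sea=1, sand=2, cutoff=1, rounds=1):
--     '''
--     Fill in ocean surrounded by land
--     '''
--     h = len(grid)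
--     w = len(grid[0]) if grid else 0
--     while True:
--         flips = [(x, y)
--                  for y in range(1, h - 1)
--                  for x in range(1, w - 1)
--                  if grid[x][y] == land
--                  and sum(grid[x + dx][y + dy] == sea for dx, dy in OFF8) > cutoff]
--         grid = [[sand if (x, y) in flips else v for y, v in enumerate(row)]
--                 for x, row in enumerate(grid)]
--         if rounds > 0 and flips:
--             rounds -= 1
--         else:
--             return grid
-- ===== Notes on version B (the rewrite author's own statement) =====
-- stated objective: alternative
-- what changed: A cascades in place cell-by-cell and recurses per round; B computes each pass functionally as a snapshot: a comprehension collects the flip coordinates against the frozen grid, a second comprehension rebuilds the grid, and a while loop drives the rounds; B compares with == where A uses the identity test `is`.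
import Mathlib
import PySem

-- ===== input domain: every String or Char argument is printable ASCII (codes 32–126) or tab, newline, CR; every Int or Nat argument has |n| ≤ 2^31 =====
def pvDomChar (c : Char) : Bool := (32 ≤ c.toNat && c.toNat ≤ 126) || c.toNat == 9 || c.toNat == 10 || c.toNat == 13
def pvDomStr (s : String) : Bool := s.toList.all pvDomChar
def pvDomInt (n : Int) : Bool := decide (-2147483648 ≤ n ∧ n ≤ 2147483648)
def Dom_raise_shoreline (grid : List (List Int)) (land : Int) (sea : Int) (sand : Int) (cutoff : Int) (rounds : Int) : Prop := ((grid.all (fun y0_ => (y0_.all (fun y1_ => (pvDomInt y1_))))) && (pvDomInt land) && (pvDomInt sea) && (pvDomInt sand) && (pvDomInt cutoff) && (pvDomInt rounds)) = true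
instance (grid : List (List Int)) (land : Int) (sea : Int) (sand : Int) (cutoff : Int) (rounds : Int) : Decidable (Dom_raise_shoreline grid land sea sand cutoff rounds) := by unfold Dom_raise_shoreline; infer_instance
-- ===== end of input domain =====

-- B replaces A's in-place cell-by-cell cascade and per-round recursion by functional
-- snapshot passes (collect the flip coordinates against a frozen grid, rebuild the grid)
-- driven by a while loop (objective: alternative).  Python A mutates `grid` in place,
-- Python B does not; the theorems below are about the returned value.

-- shared index helpers: grid[x][y] and grid[x][y] = v.  Inside Pre_ every access performed
-- by either Python is in range, so the pyGetD/pySetD defaults are never meaningful.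
def getCell (g : List (List Int)) (x y : Int) : Int :=
  PySem.List.pyGetD (PySem.List.pyGetD g x []) y 0

def setCell (g : List (List Int)) (x y : Int) (v : Int) : List (List Int) :=
  PySem.List.pySetD g x (PySem.List.pySetD (PySem.List.pyGetD g x []) y v)

-- ===== PORT A =====
-- body of A's inner loop: test grid[x][y] is land, build the 8-element neighbor
-- list, flip to sand (and record it) when neighbors.count(sea) > cutoff
def stepA (land sea sand cutoff y : Int) (st : List (List Int) × Bool) (x : Int) :
    List (List Int) × Bool :=
  if getCell st.1 x y == land then
    let neighbors := [getCell st.1 (x-1) (y-1), getCell st.1 (x-1) y, getCell st.1 (x-1) (y+1),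
                      getCell st.1 x (y-1), getCell st.1 x (y+1), getCell st.1 (x+1) (y-1),
                      getCell st.1 (x+1) y, getCell st.1 (x+1) (y+1)]
    if cutoff < (neighbors.count sea : Int) then (setCell st.1 x y sand, true)
    else st
  else st

-- one recursion level of A's body before the recursive call (the double for-loop)
def passA (g : List (List Int)) (land sea sand cutoff : Int) : List (List Int) × Bool :=
  (PySem.List.pyRange 1 ((g.length : Int) - 1) 1).foldl (fun st y =>
    (PySem.List.pyRange 1 (((PySem.List.pyGetD st.1 0 []).length : Int) - 1) 1).foldl
      (stepA land sea sand cutoff y) st)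
    (g, false)

def raise_shoreline (grid : List (List Int)) (land : Int) (sea : Int) (sand : Int) (cutoff : Int) (rounds : Int) : List (List Int) :=
  if h : 0 < rounds ∧ (passA grid land sea sand cutoff).2 = true then
    raise_shoreline (passA grid land sea sand cutoff).1 land sea sand cutoff (rounds - 1)
  else (passA grid land sea sand cutoff).1
termination_by rounds.toNat
decreasing_by omega

-- ===== PORT B =====
-- the module constant OFF8
def off8 : List (Int × Int) := [(-1,-1),(-1,0),(-1,1),(0,-1),(0,1),(1,-1),(1,0),(1,1)]

-- the flips comprehension: coordinates whose cell is land with > cutoff sea neighbors,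
-- all read from the frozen grid g
def flipsB (g : List (List Int)) (land sea cutoff h w : Int) : List (Int × Int) :=
  (PySem.List.pyRange 1 (h - 1) 1).flatMap (fun y =>
    ((PySem.List.pyRange 1 (w - 1) 1).filter (fun x =>
      getCell g x y == land &&
        decide (cutoff < (off8.map (fun d =>
          if getCell g (x + d.1) (y + d.2) == sea then (1 : Int) else 0)).sum))).map
      (fun x => (x, y)))

-- the rebuild comprehension: substitute sand at every flipped coordinate
def applyB (g : List (List Int)) (flips : List (Int × Int)) (sand : Int) : List (List Int) :=
  (PySem.List.enumerate g 0).map (fun xr =>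
    (PySem.List.enumerate xr.2 0).map (fun yv =>
      if flips.contains (xr.1, yv.1) then sand else yv.2))

-- the `while True` driver (h, w are computed once, before the loop)
def loopB (land sea sand cutoff h w : Int) (rounds : Int) (g : List (List Int)) :
    List (List Int) :=
  let fl := flipsB g land sea cutoff h w
  if hc : 0 < rounds ∧ fl ≠ [] then
    loopB land sea sand cutoff h w (rounds - 1) (applyB g fl sand)
  else applyB g fl sand
termination_by rounds.toNat
decreasing_by omega

def raise_shoreline_alt (grid : List (List Int)) (land : Int) (sea : Int) (sand : Int) (cutoff : Int) (rounds : Int) : List (List Int) :=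
  loopB land sea sand cutoff (grid.length : Int)
    (if grid.isEmpty then 0 else ((grid.headD []).length : Int)) rounds grid

-- ===== PRECONDITION & SPEC =====
-- Pre_ excludes (a) ragged/short-row grids on which Python A raises IndexError,
-- (b) grids whose compared values (cells or `land`) lie outside CPython's small-int
-- cache [-5,256], where A's `grid[x][y] is land` identity test depends on object
-- identity rather than value (B uses `==`), and (c) the degenerate colour collisions
-- sea = land and sea = sand, where A's in-place flips feed back into the same pass's
-- neighbor counts in scan order while B's snapshot pass does not — both results are
-- defensible there.  When the interior is empty (fewer than 3 rows, or first row
-- shorter than 3) no cell is ever touched and no condition is imposed.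
def Pre_raise_shoreline (grid : List (List Int)) (land : Int) (sea : Int) (sand : Int) (cutoff : Int) (rounds : Int) : Prop :=
  grid.length < 3 ∨ (grid.headD []).length < 3 ∨
    ((grid.headD []).length ≤ grid.length ∧
     (∀ r ∈ grid.take (grid.headD []).length, grid.length ≤ r.length) ∧
     -5 ≤ land ∧ land ≤ 256 ∧ (∀ r ∈ grid, ∀ v ∈ r, -5 ≤ v ∧ v ≤ 256) ∧
     sea ≠ land ∧ sea ≠ sand)
instance (grid : List (List Int)) (land : Int) (sea : Int) (sand : Int) (cutoff : Int) (rounds : Int) : Decidable (Pre_raise_shoreline grid land sea sand cutoff rounds) := by unfold Pre_raise_shoreline; infer_instance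

def pvWitness_raise_shoreline : List (List Int) × Int × Int × Int × Int × Int :=
  ([[1, 1, 1], [1, 9, 1], [1, 1, 1]], 9, 1, 2, 1, 1)

def Spec_raise_shoreline (grid : List (List Int)) (land : Int) (sea : Int) (sand : Int) (cutoff : Int) (rounds : Int) (out : List (List Int)) : Prop := out = raise_shoreline_alt grid land sea sand cutoff rounds
instance (grid : List (List Int)) (land : Int) (sea : Int) (sand : Int) (cutoff : Int) (rounds : Int) (out : List (List Int)) : Decidable (Spec_raise_shoreline grid land sea sand cutoff rounds out) := by unfold Spec_raise_shoreline; infer_instance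

-- ===== CLAIM (what is proved, stated in full; the proofs are below) =====
def Claim_equal_raise_shoreline : Prop := ∀ (grid : List (List Int)) (land : Int) (sea : Int) (sand : Int) (cutoff : Int) (rounds : Int), Dom_raise_shoreline grid land sea sand cutoff rounds → Pre_raise_shoreline grid land sea sand cutoff rounds → Spec_raise_shoreline grid land sea sand cutoff rounds (raise_shoreline grid land sea sand cutoff rounds)

-- ===== LEMMAS AND PROOFS =====

-- A's flip condition at (x, y), read from grid g (proof-side characterisation)
def condA (g : List (List Int)) (land sea cutoff x y : Int) : Bool :=
  (getCell g x y == land) &&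
    decide (cutoff < ([getCell g (x-1) (y-1), getCell g (x-1) y, getCell g (x-1) (y+1),
                       getCell g x (y-1), getCell g x (y+1), getCell g (x+1) (y-1),
                       getCell g (x+1) y, getCell g (x+1) (y+1)].count sea : Int))

-- B's flip condition at (x, y) (the filter predicate of flipsB)
def condB (g : List (List Int)) (land sea cutoff x y : Int) : Bool :=
  getCell g x y == land &&
    decide (cutoff < (off8.map (fun d =>
      if getCell g (x + d.1) (y + d.2) == sea then (1 : Int) else 0)).sum)

-- sequential in-place substitution (proof-side)
def subst (g : List (List Int)) (S : List (Int × Int)) (sand : Int) : List (List Int) :=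
  S.foldl (fun g p => setCell g p.1 p.2 sand) g





-- ===== bridges to plain List.getD / List.set =====

theorem getCell_eq (g : List (List Int)) (x y : Int) (hx : 0 ≤ x) (hy : 0 ≤ y) :
    getCell g x y = (g.getD x.toNat []).getD y.toNat 0 := by
  unfold getCell
  rw [PySem.List.pyGetD_of_nonneg g [] hx, PySem.List.pyGetD_of_nonneg _ 0 hy]

theorem setCell_eq (g : List (List Int)) (a b v : Int) (ha : 0 ≤ a) (hb : 0 ≤ b) :
    setCell g a b v = g.set a.toNat ((g.getD a.toNat []).set b.toNat v) := by
  unfold setCell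
  rw [PySem.List.pySetD_of_nonneg _ _ hb, PySem.List.pySetD_of_nonneg _ _ ha,
    PySem.List.pyGetD_of_nonneg g [] ha]

theorem len_setCell (g : List (List Int)) (a b v : Int) :
    (setCell g a b v).length = g.length := by
  simp [setCell, PySem.List.length_pySetD]

theorem rowlenD_setCell (g : List (List Int)) (a b v : Int) (ha : 0 ≤ a) (hb : 0 ≤ b)
    (x : Nat) : ((setCell g a b v).getD x []).length = (g.getD x []).length := by
  rw [setCell_eq _ _ _ _ ha hb, List.getD_eq_getElem?_getD, List.getElem?_set]
  by_cases h1 : a.toNat = x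
  · by_cases h2 : a.toNat < g.length
    · rw [if_pos h1, if_pos h2, Option.getD_some, List.length_set, h1,
        List.getD_eq_getElem?_getD]
    · rw [if_pos h1, if_neg h2, List.getD_eq_getElem?_getD,
        List.getElem?_eq_none_iff.mpr (by omega)]
  · rw [if_neg h1, List.getD_eq_getElem?_getD]

-- the one low-level fact: a single in-place write, read back anywhere (nonneg coords)
theorem getCell_setCell (g : List (List Int)) (a b v x y : Int) (ha : 0 ≤ a) (hb : 0 ≤ b)
    (hx : 0 ≤ x) (hy : 0 ≤ y) :
    getCell (setCell g a b v) x y =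
      if a = x ∧ b = y ∧ x.toNat < g.length ∧ y.toNat < (g.getD x.toNat []).length then v
      else getCell g x y := by
  rw [setCell_eq _ _ _ _ ha hb, getCell_eq _ _ _ hx hy, getCell_eq _ _ _ hx hy,
    List.getD_eq_getElem?_getD (l := List.set _ _ _), List.getElem?_set]
  by_cases c1 : a.toNat = x.toNat
  · have hax : a = x := by omega
    by_cases c2 : a.toNat < g.length
    · rw [if_pos c1, if_pos c2, Option.getD_some,
        List.getD_eq_getElem?_getD (l := List.set _ _ _), List.getElem?_set]
      by_cases c3 : b.toNat = y.toNat
      · have hby : b = y := by omega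
        by_cases c4 : b.toNat < (g.getD a.toNat []).length
        · rw [if_pos c3, if_pos c4, Option.getD_some,
            if_pos ⟨hax, hby, by omega, by rw [← c1]; omega⟩]
        · rw [if_pos c3, if_neg c4, if_neg (by rintro ⟨h1, h2, h3, h4⟩; rw [← c1] at h4; omega),
            List.getD_eq_getElem?_getD, List.getElem?_eq_none_iff.mpr (by rw [← c1]; omega)]
      · rw [if_neg c3, if_neg (by rintro ⟨h1, h2, h3, h4⟩; omega),
          ← List.getD_eq_getElem?_getD, c1]
    · rw [if_pos c1, if_neg c2, Option.getD_none, if_neg (by rintro ⟨h1, h2, h3, h4⟩; omega),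
        List.getD_eq_getElem?_getD (l := g), List.getElem?_eq_none_iff.mpr (by omega)]
      rfl
  · rw [if_neg c1, ← List.getD_eq_getElem?_getD, if_neg (by rintro ⟨h1, h2, h3, h4⟩; omega)]

-- ===== the sequential substitution `subst` =====

theorem subst_cons (g : List (List Int)) (p : Int × Int) (S : List (Int × Int)) (sand : Int) :
    subst g (p :: S) sand = subst (setCell g p.1 p.2 sand) S sand := rfl

theorem subst_append_singleton (g : List (List Int)) (S : List (Int × Int)) (p : Int × Int)
    (sand : Int) : subst g (S ++ [p]) sand = setCell (subst g S sand) p.1 p.2 sand := by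
  simp [subst, List.foldl_append]

theorem len_subst (g : List (List Int)) (S : List (Int × Int)) (sand : Int) :
    (subst g S sand).length = g.length := by
  induction S generalizing g with
  | nil => rfl
  | cons p S ih => rw [subst_cons, ih, len_setCell]

theorem rowlenD_subst (g : List (List Int)) (S : List (Int × Int)) (sand : Int)
    (hS : ∀ p ∈ S, 0 ≤ p.1 ∧ 0 ≤ p.2) (x : Nat) :
    ((subst g S sand).getD x []).length = (g.getD x []).length := by
  induction S generalizing g with
  | nil => rfl
  | cons p S ih =>
    rw [subst_cons, ih _ (fun q hq => hS q (List.mem_cons_of_mem _ hq)),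
      rowlenD_setCell g p.1 p.2 sand (hS p List.mem_cons_self).1 (hS p List.mem_cons_self).2]

theorem getCell_subst_not_mem (g : List (List Int)) (S : List (Int × Int)) (sand x y : Int)
    (hS : ∀ p ∈ S, 0 ≤ p.1 ∧ 0 ≤ p.2) (hx : 0 ≤ x) (hy : 0 ≤ y) (hmem : (x, y) ∉ S) :
    getCell (subst g S sand) x y = getCell g x y := by
  induction S generalizing g with
  | nil => rfl
  | cons p S ih =>
    rw [subst_cons, ih _ (fun q hq => hS q (List.mem_cons_of_mem _ hq))
      (fun h => hmem (List.mem_cons_of_mem _ h)),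
      getCell_setCell g p.1 p.2 sand x y (hS p List.mem_cons_self).1
        (hS p List.mem_cons_self).2 hx hy, if_neg]
    rintro ⟨h1, h2, -⟩
    exact hmem (by rw [show (x, y) = p from Prod.ext h1.symm h2.symm]; exact List.mem_cons_self)

theorem getCell_subst_or (g : List (List Int)) (S : List (Int × Int)) (sand x y : Int)
    (hS : ∀ p ∈ S, 0 ≤ p.1 ∧ 0 ≤ p.2) (hx : 0 ≤ x) (hy : 0 ≤ y) :
    getCell (subst g S sand) x y = sand ∨ getCell (subst g S sand) x y = getCell g x y := by
  induction S generalizing g with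
  | nil => exact Or.inr rfl
  | cons p S ih =>
    rw [subst_cons]
    rcases ih (setCell g p.1 p.2 sand) (fun q hq => hS q (List.mem_cons_of_mem _ hq)) with h | h
    · exact Or.inl h
    · rw [h, getCell_setCell g p.1 p.2 sand x y (hS p List.mem_cons_self).1
        (hS p List.mem_cons_self).2 hx hy]
      split_ifs
      · exact Or.inl rfl
      · exact Or.inr rfl

-- ===== the flip condition only depends on the frozen grid =====

theorem beq_sea_subst (g : List (List Int)) (S : List (Int × Int)) (land sand sea u v : Int)
    (hl : sea ≠ land) (hs : sea ≠ sand)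
    (hS : ∀ p ∈ S, (1 ≤ p.1 ∧ 1 ≤ p.2) ∧ getCell g p.1 p.2 = land)
    (hu : 0 ≤ u) (hv : 0 ≤ v) :
    (getCell (subst g S sand) u v == sea) = (getCell g u v == sea) := by
  have hnn : ∀ p ∈ S, 0 ≤ p.1 ∧ 0 ≤ p.2 :=
    fun p hp => ⟨le_trans (by omega) (hS p hp).1.1, le_trans (by omega) (hS p hp).1.2⟩
  by_cases hmem : (u, v) ∈ S
  · have horig : getCell g u v = land := (hS _ hmem).2
    rcases getCell_subst_or g S sand u v hnn hu hv with h | h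
    · rw [h, horig, beq_eq_false_iff_ne.mpr (show sand ≠ sea by omega),
        beq_eq_false_iff_ne.mpr (show land ≠ sea by omega)]
    · rw [h]
  · rw [getCell_subst_not_mem g S sand u v hnn hu hv hmem]

theorem condA_subst (g : List (List Int)) (S : List (Int × Int)) (land sea sand cutoff x y : Int)
    (hl : sea ≠ land) (hs : sea ≠ sand)
    (hS : ∀ p ∈ S, (1 ≤ p.1 ∧ 1 ≤ p.2) ∧ getCell g p.1 p.2 = land)
    (hx : 1 ≤ x) (hy : 1 ≤ y) (hmem : (x, y) ∉ S) :
    condA (subst g S sand) land sea cutoff x y = condA g land sea cutoff x y := by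
  have hnn : ∀ p ∈ S, 0 ≤ p.1 ∧ 0 ≤ p.2 :=
    fun p hp => ⟨le_trans (by omega) (hS p hp).1.1, le_trans (by omega) (hS p hp).1.2⟩
  have hown := getCell_subst_not_mem g S sand x y hnn (by omega) (by omega) hmem
  have hn : ∀ u v : Int, 0 ≤ u → 0 ≤ v →
      (getCell (subst g S sand) u v == sea) = (getCell g u v == sea) :=
    fun u v hu hv => beq_sea_subst g S land sand sea u v hl hs hS hu hv
  unfold condA
  rw [hown]
  simp only [List.count_cons, List.count_nil]
  rw [hn (x-1) (y-1) (by omega) (by omega), hn (x-1) y (by omega) (by omega),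
    hn (x-1) (y+1) (by omega) (by omega), hn x (y-1) (by omega) (by omega),
    hn x (y+1) (by omega) (by omega), hn (x+1) (y-1) (by omega) (by omega),
    hn (x+1) y (by omega) (by omega), hn (x+1) (y+1) (by omega) (by omega)]

set_option maxHeartbeats 1600000 in
theorem condA_eq_condB (g : List (List Int)) (land sea cutoff x y : Int) :
    condA g land sea cutoff x y = condB g land sea cutoff x y := by
  unfold condA condB
  congr 1
  simp only [off8, List.map_cons, List.map_nil, List.sum_cons, List.sum_nil,
    List.count_cons, List.count_nil, Int.sub_eq_add_neg]
  norm_num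
  split_ifs <;> omega

theorem stepA_eq (land sea sand cutoff y : Int) (st : List (List Int) × Bool) (x : Int) :
    stepA land sea sand cutoff y st x =
      if condA st.1 land sea cutoff x y then (setCell st.1 x y sand, true) else st := by
  unfold stepA condA
  by_cases h1 : getCell st.1 x y == land <;>
    by_cases h2 : cutoff < ([getCell st.1 (x-1) (y-1), getCell st.1 (x-1) y,
      getCell st.1 (x-1) (y+1), getCell st.1 x (y-1), getCell st.1 x (y+1),
      getCell st.1 (x+1) (y-1), getCell st.1 (x+1) y, getCell st.1 (x+1) (y+1)].count sea : Int) <;>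
    simp [h1, h2]

theorem cond_true_land (g : List (List Int)) (land sea cutoff x y : Int)
    (hc : condA g land sea cutoff x y = true) : getCell g x y = land := by
  unfold condA at hc
  rw [Bool.and_eq_true, beq_iff_eq] at hc
  exact hc.1

-- A's inner loop over one row, on a partially rewritten grid, collects the
-- row's flips of the frozen grid
theorem inner_fold (g : List (List Int)) (land sea sand cutoff : Int)
    (hl : sea ≠ land) (hs : sea ≠ sand) (y : Int) (hy : 1 ≤ y)
    (X : List Int) (S : List (Int × Int)) (b : Bool)
    (hnd : X.Nodup) (hge : ∀ x ∈ X, 1 ≤ x) (hfresh : ∀ x ∈ X, (x, y) ∉ S)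
    (hS : ∀ p ∈ S, (1 ≤ p.1 ∧ 1 ≤ p.2) ∧ getCell g p.1 p.2 = land) :
    X.foldl (stepA land sea sand cutoff y) (subst g S sand, b) =
      (subst g (S ++ (X.filter (fun x => condA g land sea cutoff x y)).map (fun x => (x, y))) sand,
       b || !(X.filter (fun x => condA g land sea cutoff x y)).isEmpty) := by
  induction X generalizing S b with
  | nil => simp
  | cons x X ih =>
    simp only [List.foldl_cons]
    rw [stepA_eq]
    rw [show ((subst g S sand, b) : List (List Int) × Bool).1 = subst g S sand from rfl,
      condA_subst g S land sea sand cutoff x y hl hs hS (hge x List.mem_cons_self) hy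
        (hfresh x List.mem_cons_self)]
    by_cases hc : condA g land sea cutoff x y
    · rw [if_pos hc,
        show (setCell (subst g S sand) x y sand, true) =
          ((subst g (S ++ [(x, y)]) sand : List (List Int)), true) from by
            rw [subst_append_singleton],
        ih (S ++ [(x, y)]) true hnd.of_cons (fun z hz => hge z (List.mem_cons_of_mem _ hz))
          (fun z hz hmem => by
            rcases List.mem_append.mp hmem with h | h
            · exact hfresh z (List.mem_cons_of_mem _ hz) h
            · have : z = x := by simpa using h
              exact (List.nodup_cons.mp hnd).1 (this ▸ hz))
          (fun p hp => by
            rcases List.mem_append.mp hp with h | h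
            · exact hS p h
            · have hpx : p = (x, y) := by simpa using h
              subst hpx
              exact ⟨⟨hge x List.mem_cons_self, hy⟩, cond_true_land g land sea cutoff x y hc⟩)]
      simp [hc, List.append_assoc]
    · rw [if_neg hc,
        ih S b hnd.of_cons (fun z hz => hge z (List.mem_cons_of_mem _ hz))
          (fun z hz => hfresh z (List.mem_cons_of_mem _ hz)) hS]
      simp [hc]

theorem flag_merge {α β : Type} (b : Bool) (f : α → β) (l1 : List α) (l2 : List β) :
    (b || (!l1.isEmpty || !l2.isEmpty)) = (b || !((l1.map f) ++ l2).isEmpty) := by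
  cases l1 <;> cases b <;> simp

-- A's outer loop collects, row by row, exactly the flips of the frozen grid
theorem outer_fold (g : List (List Int)) (land sea sand cutoff : Int)
    (hl : sea ≠ land) (hs : sea ≠ sand)
    (Ys : List Int) (S : List (Int × Int)) (b : Bool)
    (hnd : Ys.Nodup) (hge : ∀ y ∈ Ys, 1 ≤ y) (hfresh : ∀ p ∈ S, p.2 ∉ Ys)
    (hS : ∀ p ∈ S, (1 ≤ p.1 ∧ 1 ≤ p.2) ∧ getCell g p.1 p.2 = land) :
    Ys.foldl (fun st y =>
        (PySem.List.pyRange 1 (((PySem.List.pyGetD st.1 0 []).length : Int) - 1) 1).foldl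
          (stepA land sea sand cutoff y) st) (subst g S sand, b) =
      (subst g (S ++ Ys.flatMap (fun y =>
          ((PySem.List.pyRange 1 (((PySem.List.pyGetD g 0 []).length : Int) - 1) 1).filter
            (fun x => condA g land sea cutoff x y)).map (fun x => (x, y)))) sand,
       b || !(Ys.flatMap (fun y =>
          ((PySem.List.pyRange 1 (((PySem.List.pyGetD g 0 []).length : Int) - 1) 1).filter
            (fun x => condA g land sea cutoff x y)).map (fun x => (x, y)))).isEmpty) := by
  induction Ys generalizing S b with
  | nil => simp
  | cons y Ys ih =>
    have hnn : ∀ p ∈ S, 0 ≤ p.1 ∧ 0 ≤ p.2 :=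
      fun p hp => ⟨le_trans (by omega) (hS p hp).1.1, le_trans (by omega) (hS p hp).1.2⟩
    have hy : 1 ≤ y := hge y List.mem_cons_self
    simp only [List.foldl_cons]
    have hw : ((PySem.List.pyGetD (((subst g S sand, b) :
        List (List Int) × Bool).1) 0 []).length : Int) =
        ((PySem.List.pyGetD g 0 []).length : Int) := by
      rw [show (((subst g S sand, b) : List (List Int) × Bool)).1 = subst g S sand from rfl,
        PySem.List.pyGetD_zero, PySem.List.pyGetD_zero, rowlenD_subst g S sand hnn 0]
    rw [hw]
    rw [inner_fold g land sea sand cutoff hl hs y hy _ S b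
      (PySem.List.nodup_pyRange_one _ _)
      (fun x hx => (PySem.List.mem_pyRange_one.mp hx).1)
      (fun x _ hmem => (hfresh _ hmem) List.mem_cons_self)
      hS]
    rw [ih _ _
      hnd.of_cons
      (fun z hz => hge z (List.mem_cons_of_mem _ hz))
      (fun p hp => by
        rcases List.mem_append.mp hp with h | h
        · exact fun hm => hfresh p h (List.mem_cons_of_mem _ hm)
        · rcases List.mem_map.mp h with ⟨x, hx, rfl⟩
          exact fun hm => (List.nodup_cons.mp hnd).1 hm)
      (fun p hp => by
        rcases List.mem_append.mp hp with h | h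
        · exact hS p h
        · rcases List.mem_map.mp h with ⟨x, hx, rfl⟩
          have hx' := List.mem_filter.mp hx
          have hx1 : 1 ≤ x := (PySem.List.mem_pyRange_one.mp hx'.1).1
          exact ⟨⟨hx1, hy⟩, cond_true_land g land sea cutoff x y hx'.2⟩)]
    simp [List.append_assoc, Bool.or_assoc, ← flag_merge]

-- ===== the flips list of a pass =====

def flipsA (g : List (List Int)) (land sea cutoff h w : Int) : List (Int × Int) :=
  (PySem.List.pyRange 1 (h - 1) 1).flatMap (fun y =>
    ((PySem.List.pyRange 1 (w - 1) 1).filter (fun x => condA g land sea cutoff x y)).map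
      (fun x => (x, y)))

theorem flipsA_eq_flipsB (g : List (List Int)) (land sea cutoff h w : Int) :
    flipsA g land sea cutoff h w = flipsB g land sea cutoff h w := by
  unfold flipsA flipsB
  congr 1
  funext y
  congr 1
  apply List.filter_congr
  intro x _
  exact condA_eq_condB g land sea cutoff x y

theorem flips_bounds (g : List (List Int)) (land sea cutoff h w : Int) (p : Int × Int)
    (hp : p ∈ flipsA g land sea cutoff h w) : 1 ≤ p.1 ∧ 1 ≤ p.2 := by
  unfold flipsA at hp
  rcases List.mem_flatMap.mp hp with ⟨y, hy, hm⟩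
  rcases List.mem_map.mp hm with ⟨x, hxf, rfl⟩
  exact ⟨(PySem.List.mem_pyRange_one.mp (List.mem_filter.mp hxf).1).1,
    (PySem.List.mem_pyRange_one.mp hy).1⟩

theorem passA_eq (g : List (List Int)) (land sea sand cutoff : Int)
    (hl : sea ≠ land) (hs : sea ≠ sand) :
    passA g land sea sand cutoff =
      (subst g (flipsA g land sea cutoff (g.length : Int)
          ((PySem.List.pyGetD g 0 []).length : Int)) sand,
       !(flipsA g land sea cutoff (g.length : Int)
          ((PySem.List.pyGetD g 0 []).length : Int)).isEmpty) := by
  unfold passA flipsA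
  have h := outer_fold g land sea sand cutoff hl hs
    (PySem.List.pyRange 1 ((g.length : Int) - 1) 1) [] false
    (PySem.List.nodup_pyRange_one _ _)
    (fun y hy => (PySem.List.mem_pyRange_one.mp hy).1)
    (by simp) (by simp)
  simpa [subst] using h

-- ===== applyB is the pointwise form of the substitution =====

theorem len_applyB (g : List (List Int)) (S : List (Int × Int)) (sand : Int) :
    (applyB g S sand).length = g.length := by
  simp [applyB, PySem.List.length_enumerate]

theorem nil_applyB (g : List (List Int)) (sand : Int) : applyB g [] sand = g := by
  simp [applyB, PySem.List.map_snd_enumerate]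

theorem rowlenD_applyB (g : List (List Int)) (S : List (Int × Int)) (sand : Int) (x : Nat) :
    ((applyB g S sand).getD x []).length = (g.getD x []).length := by
  rw [List.getD_eq_getElem?_getD, List.getD_eq_getElem?_getD]
  unfold applyB
  rw [List.getElem?_map, PySem.List.getElem?_enumerate]
  cases h : g[x]? with
  | none => rfl
  | some r => simp [PySem.List.length_enumerate]

theorem getD_applyB (g : List (List Int)) (S : List (Int × Int)) (sand : Int) (x y : Nat)
    (hx : x < g.length) (hy : y < (g.getD x []).length) :
    ((applyB g S sand).getD x []).getD y 0 =
      if S.contains ((x : Int), (y : Int)) then sand else (g.getD x []).getD y 0 := by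
  have hy' : y < (g[x]).length := by rwa [List.getD_eq_getElem g [] hx] at hy
  conv_rhs => rw [List.getD_eq_getElem g [] hx, List.getD_eq_getElem _ _ hy']
  rw [List.getD_eq_getElem?_getD (l := applyB g S sand) (i := x)]
  unfold applyB
  rw [List.getElem?_map, PySem.List.getElem?_enumerate, List.getElem?_eq_getElem hx]
  simp only [Option.map_some, Option.getD_some]
  rw [List.getD_eq_getElem?_getD, List.getElem?_map, PySem.List.getElem?_enumerate,
    List.getElem?_eq_getElem hy']
  simp only [Option.map_some, Option.getD_some, zero_add]

theorem getD_setCell (g : List (List Int)) (a b v : Int) (ha : 0 ≤ a) (hb : 0 ≤ b)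
    (x y : Nat) (hx : x < g.length) (hy : y < (g.getD x []).length) :
    ((setCell g a b v).getD x []).getD y 0 =
      if a = (x : Int) ∧ b = (y : Int) then v else (g.getD x []).getD y 0 := by
  have h := getCell_setCell g a b v (x : Int) (y : Int) ha hb
    (Int.natCast_nonneg x) (Int.natCast_nonneg y)
  rw [getCell_eq (setCell g a b v) _ _ (Int.natCast_nonneg x) (Int.natCast_nonneg y),
    getCell_eq g _ _ (Int.natCast_nonneg x) (Int.natCast_nonneg y)] at h
  simp only [Int.toNat_natCast] at h
  rw [h]
  by_cases hab : a = (x : Int) ∧ b = (y : Int)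
  · rw [if_pos ⟨hab.1, hab.2, hx, hy⟩, if_pos hab]
  · rw [if_neg (fun hc => hab ⟨hc.1, hc.2.1⟩), if_neg hab]

theorem getD_subst (g : List (List Int)) (S : List (Int × Int)) (sand : Int)
    (hS : ∀ p ∈ S, 0 ≤ p.1 ∧ 0 ≤ p.2) (x y : Nat)
    (hx : x < g.length) (hy : y < (g.getD x []).length) :
    ((subst g S sand).getD x []).getD y 0 =
      if S.contains ((x : Int), (y : Int)) then sand else (g.getD x []).getD y 0 := by
  induction S generalizing g with
  | nil => simp [subst]
  | cons p S ih =>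
    have h0 := hS p List.mem_cons_self
    rw [subst_cons, ih (setCell g p.1 p.2 sand)
      (fun q hq => hS q (List.mem_cons_of_mem _ hq))
      (by rw [len_setCell]; exact hx)
      (by rw [rowlenD_setCell g p.1 p.2 sand h0.1 h0.2 x]; exact hy)]
    by_cases hSc : ((x : Int), (y : Int)) ∈ S
    · rw [if_pos (List.contains_iff_mem.mpr hSc),
        if_pos (List.contains_iff_mem.mpr (List.mem_cons_of_mem _ hSc))]
    · rw [if_neg (fun hc => hSc (List.contains_iff_mem.mp hc)),
        getD_setCell g p.1 p.2 sand h0.1 h0.2 x y hx hy]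
      by_cases hp : p = ((x : Int), (y : Int))
      · rw [if_pos (by rw [hp]; exact ⟨rfl, rfl⟩),
          if_pos (List.contains_iff_mem.mpr (by rw [hp]; exact List.mem_cons_self))]
      · rw [if_neg (fun hc => hp (Prod.ext hc.1 hc.2)),
          if_neg (fun hc => by
            rcases List.mem_cons.mp (List.contains_iff_mem.mp hc) with h | h
            · exact hp h.symm
            · exact hSc h)]

theorem subst_eq_applyB (g : List (List Int)) (S : List (Int × Int)) (sand : Int)
    (hS : ∀ p ∈ S, 0 ≤ p.1 ∧ 0 ≤ p.2) :
    subst g S sand = applyB g S sand := by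
  apply List.ext_getElem (by rw [len_subst, len_applyB])
  intro i h1 h2
  have hi : i < g.length := by rwa [len_subst] at h1
  have e1 : (subst g S sand)[i] = (subst g S sand).getD i [] :=
    (List.getD_eq_getElem _ _ h1).symm
  have e2 : (applyB g S sand)[i] = (applyB g S sand).getD i [] :=
    (List.getD_eq_getElem _ _ h2).symm
  rw [e1, e2]
  apply List.ext_getElem (by rw [rowlenD_subst g S sand hS, rowlenD_applyB])
  intro j hj1 hj2
  have hj : j < (g.getD i []).length := by rwa [rowlenD_subst g S sand hS] at hj1
  have f1 : ((subst g S sand).getD i [])[j] = ((subst g S sand).getD i []).getD j 0 :=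
    (List.getD_eq_getElem _ _ hj1).symm
  have f2 : ((applyB g S sand).getD i [])[j] = ((applyB g S sand).getD i []).getD j 0 :=
    (List.getD_eq_getElem _ _ hj2).symm
  rw [f1, f2, getD_subst g S sand hS i j hi hj, getD_applyB g S sand i j hi hj]

-- ===== a full pass of A, in B's snapshot form =====

theorem pass_full (g : List (List Int)) (land sea sand cutoff : Int)
    (hl : sea ≠ land) (hs : sea ≠ sand) :
    passA g land sea sand cutoff =
      (applyB g (flipsB g land sea cutoff (g.length : Int)
          ((PySem.List.pyGetD g 0 []).length : Int)) sand,
       !(flipsB g land sea cutoff (g.length : Int)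
          ((PySem.List.pyGetD g 0 []).length : Int)).isEmpty) := by
  rw [passA_eq g land sea sand cutoff hl hs,
    subst_eq_applyB g _ sand (fun p hp =>
      ⟨le_trans (by omega) (flips_bounds g land sea cutoff _ _ p hp).1,
       le_trans (by omega) (flips_bounds g land sea cutoff _ _ p hp).2⟩),
    flipsA_eq_flipsB]

-- ===== degenerate interiors: nothing happens =====

theorem flipsB_nil (g : List (List Int)) (land sea cutoff h w : Int)
    (hcond : h - 1 ≤ 1 ∨ w - 1 ≤ 1) : flipsB g land sea cutoff h w = [] := by
  unfold flipsB
  rcases hcond with hh | hw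
  · rw [PySem.List.pyRange_one_eq_nil (a := 1) (b := h - 1) (by omega)]
    rfl
  · simp [PySem.List.pyRange_one_eq_nil (show w - 1 ≤ (1 : Int) by omega)]

theorem passA_trivial (g : List (List Int)) (land sea sand cutoff : Int)
    (hcond : (g.length : Int) - 1 ≤ 1 ∨ ((PySem.List.pyGetD g 0 []).length : Int) - 1 ≤ 1) :
    passA g land sea sand cutoff = (g, false) := by
  unfold passA
  rcases hcond with hh | hw
  · rw [PySem.List.pyRange_one_eq_nil (by omega)]
    rfl
  · have hfix : ∀ (Ys : List Int), Ys.foldl (fun st y =>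
        (PySem.List.pyRange 1 (((PySem.List.pyGetD st.1 0 []).length : Int) - 1) 1).foldl
          (stepA land sea sand cutoff y) st) ((g, false) : List (List Int) × Bool) =
        ((g, false) : List (List Int) × Bool) := by
      intro Ys
      induction Ys with
      | nil => rfl
      | cons y Ys ih =>
        rw [List.foldl_cons,
          show ((g, false) : List (List Int) × Bool).1 = g from rfl,
          PySem.List.pyRange_one_eq_nil (show ((PySem.List.pyGetD g 0 []).length : Int) - 1 ≤ 1 by omega),
          List.foldl_nil]
        exact ih
    exact hfix _

-- ===== unfolding equations for the two drivers =====

theorem raise_shoreline_unfold (grid : List (List Int)) (land sea sand cutoff rounds : Int) :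
    raise_shoreline grid land sea sand cutoff rounds =
      if 0 < rounds ∧ (passA grid land sea sand cutoff).2 = true then
        raise_shoreline (passA grid land sea sand cutoff).1 land sea sand cutoff (rounds - 1)
      else (passA grid land sea sand cutoff).1 := by
  rw [raise_shoreline]
  split_ifs <;> rfl

theorem loopB_unfold (land sea sand cutoff h w rounds : Int) (g : List (List Int)) :
    loopB land sea sand cutoff h w rounds g =
      if 0 < rounds ∧ flipsB g land sea cutoff h w ≠ [] then
        loopB land sea sand cutoff h w (rounds - 1) (applyB g (flipsB g land sea cutoff h w) sand)
      else applyB g (flipsB g land sea cutoff h w) sand := by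
  rw [loopB]
  split_ifs <;> rfl

-- ===== the two drivers agree, by induction on the fuel rounds.toNat =====

theorem driver (land sea sand cutoff : Int) (hl : sea ≠ land) (hs : sea ≠ sand) :
    ∀ (n : Nat) (rounds : Int), rounds.toNat ≤ n → ∀ (g : List (List Int)),
      raise_shoreline g land sea sand cutoff rounds =
        loopB land sea sand cutoff (g.length : Int)
          ((PySem.List.pyGetD g 0 []).length : Int) rounds g := by
  intro n
  induction n with
  | zero =>
    intro rounds hr g
    rw [raise_shoreline_unfold, loopB_unfold, pass_full g land sea sand cutoff hl hs]
    have hneg : ¬ (0 < rounds) := by omega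
    rw [if_neg (by tauto), if_neg (by tauto)]
  | succ n ih =>
    intro rounds hr g
    rw [raise_shoreline_unfold, loopB_unfold, pass_full g land sea sand cutoff hl hs]
    by_cases hc : 0 < rounds ∧ flipsB g land sea cutoff (g.length : Int)
        ((PySem.List.pyGetD g 0 []).length : Int) ≠ []
    · rw [if_pos ⟨hc.1, by simp [hc.2]⟩, if_pos hc]
      have e1 : (((applyB g (flipsB g land sea cutoff (g.length : Int)
          ((PySem.List.pyGetD g 0 []).length : Int)) sand).length : Int) : Int) =
          ((g.length : Int) : Int) := by rw [len_applyB]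
      have e2 : ((PySem.List.pyGetD (applyB g (flipsB g land sea cutoff (g.length : Int)
          ((PySem.List.pyGetD g 0 []).length : Int)) sand) 0 []).length : Int) =
          ((PySem.List.pyGetD g 0 []).length : Int) := by
        rw [PySem.List.pyGetD_zero, PySem.List.pyGetD_zero, rowlenD_applyB]
      have := ih (rounds - 1) (by omega) (applyB g (flipsB g land sea cutoff (g.length : Int)
          ((PySem.List.pyGetD g 0 []).length : Int)) sand)
      rw [e1, e2] at this
      exact this
    · rw [if_neg (fun hcc => hc ⟨hcc.1, by simpa using hcc.2⟩), if_neg hc]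

-- ===== VERDICT (by name: the statement is the Claim_ definition above) =====
theorem raise_shoreline_spec : Claim_equal_raise_shoreline := by
  intro grid land sea sand cutoff rounds _ hpre
  unfold Spec_raise_shoreline raise_shoreline_alt
  have hwalt : (if grid.isEmpty then 0 else ((grid.headD []).length : Int)) =
      ((PySem.List.pyGetD grid 0 []).length : Int) := by
    cases grid <;> simp [PySem.List.pyGetD_zero, List.getD]
  rw [hwalt]
  have hrow0 : (PySem.List.pyGetD grid 0 []).length = (grid.headD []).length := by
    cases grid <;> simp [PySem.List.pyGetD_zero, List.getD]
  rcases hpre with hsmall | hsmall2 | ⟨-, -, -, -, -, hl, hs⟩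
  · rw [raise_shoreline_unfold, passA_trivial grid land sea sand cutoff (Or.inl (by omega)),
      loopB_unfold, flipsB_nil grid land sea cutoff _ _ (Or.inl (by omega)),
      nil_applyB]
    simp
  · rw [raise_shoreline_unfold, passA_trivial grid land sea sand cutoff (Or.inr (by omega)),
      loopB_unfold, flipsB_nil grid land sea cutoff _ _ (Or.inr (by omega)),
      nil_applyB]
    simp
  · exact driver land sea sand cutoff hl hs rounds.toNat rounds le_rfl grid
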